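-- pv_equiv track=rewrite | github.com/baambox5/algorithm | 190820/4873.py | same_char
-- ===== SOURCE A (Python) =====
-- def same_char(chars):
--     new_chars = ''
--     i = 0
--     count = 0
--     while i < len(chars):
--         if i == len(chars) - 1:
--             new_chars += chars[i]
--         else:
--             if chars[i] == chars[i + 1]:
--                 i += 1
--                 count = 1
--             else:
--                 new_chars += chars[i]
--         i += 1
--     if count:
--         return same_char(new_chars)
--     else:
--         return len(chars)
-- ===== SOURCE B (Python) =====
-- def same_char(chars):
--     stack = []
--     for c in chars:
--         if stack and stack[-1] == c:
--             stack.pop()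
--         else:
--             stack.append(c)
--     return len(stack)
-- ===== Notes on version B (the rewrite author's own statement) =====
-- stated objective: faster
-- what changed: replaces repeated left-to-right pair-removal passes with recursion until a fixed point by a single stack pass (push, pop on equal top) whose confluent normal form has the same length
import Mathlib
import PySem

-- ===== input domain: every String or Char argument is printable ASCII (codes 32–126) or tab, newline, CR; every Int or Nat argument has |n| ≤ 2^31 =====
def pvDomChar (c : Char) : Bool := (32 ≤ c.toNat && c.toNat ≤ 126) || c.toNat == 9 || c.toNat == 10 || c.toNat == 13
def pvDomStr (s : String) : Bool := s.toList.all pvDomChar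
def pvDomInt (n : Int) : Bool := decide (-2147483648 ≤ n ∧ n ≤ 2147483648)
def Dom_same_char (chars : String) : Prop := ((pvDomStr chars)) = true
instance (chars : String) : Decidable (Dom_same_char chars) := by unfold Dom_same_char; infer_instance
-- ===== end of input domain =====

-- B replaces A's repeated pair-removal passes by a single stack pass with the same result length.
-- ===== PORT A =====
-- one left-to-right pass of A's while loop: each step looks at chars[i] (and chars[i+1]
-- unless i == len-1), either keeps chars[i] or drops the equal pair and records count=1
def passA : List Char → List Char × Bool
  | [] => ([], false)
  | [c] => ([c], false)
  | a :: b :: rest =>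
    if a = b then
      ((passA rest).1, true)
    else
      (a :: (passA (b :: rest)).1, (passA (b :: rest)).2)

theorem passA_shrink (l : List Char) :
    (passA l).1.length ≤ l.length ∧ ((passA l).2 = true → (passA l).1.length < l.length) := by
  fun_induction passA l with
  | case1 => simp
  | case2 c => simp
  | case3 a rest ih =>
      obtain ⟨h1, _⟩ := ih
      exact ⟨by simp; omega, fun _ => by simp; omega⟩
  | case4 a b rest h ih =>
      obtain ⟨h1, h2⟩ := ih
      simp only [List.length_cons] at h1
      refine ⟨by simp; omega, fun hc => ?_⟩
      have := h2 (by simpa using hc)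
      simp only [List.length_cons] at this ⊢
      simp; omega

-- the recursive driver: run a pass; if count was set, recurse on new_chars, else return len(chars)
def sameGo (l : List Char) : Int :=
  if h : (passA l).2 = true then sameGo (passA l).1 else (l.length : Int)
termination_by l.length
decreasing_by exact (passA_shrink l).2 h

def same_char (chars : String) : Int := sameGo chars.toList

-- ===== PORT B =====
-- one step of B's stack loop: pop on equal top, else push
def redStep (st : List Char) (c : Char) : List Char :=
  match st with
  | [] => [c]
  | t :: ts => if t = c then ts else c :: t :: ts

def same_char_alt (chars : String) : Int :=
  ((chars.toList.foldl redStep []).length : Int)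

-- ===== PRECONDITION & SPEC =====
def Spec_same_char (chars : String) (out : Int) : Prop := out = same_char_alt chars
instance (chars : String) (out : Int) : Decidable (Spec_same_char chars out) := by unfold Spec_same_char; infer_instance

-- ===== CLAIM (what is proved, stated in full; the proofs are below) =====
def Claim_equal_same_char : Prop := ∀ (chars : String), Dom_same_char chars → Spec_same_char chars (same_char chars)

-- ===== LEMMAS AND PROOFS =====

theorem redStep_chain {st : List Char} (h : List.IsChain Ne st) (c : Char) :
    List.IsChain Ne (redStep st c) := by
  match st with
  | [] => simp [redStep]
  | t :: ts =>
      simp only [redStep]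
      split_ifs with hc
      · exact h.tail
      · exact List.isChain_cons_cons.mpr ⟨Ne.symm hc, h⟩

theorem redStep_pair {st : List Char} (h : List.IsChain Ne st) (a : Char) :
    redStep (redStep st a) a = st := by
  match st with
  | [] => simp [redStep]
  | t :: ts =>
      by_cases ht : t = a
      · match ts with
        | [] => simp [redStep, ht]
        | u :: us =>
            have hu : t ≠ u := (List.isChain_cons_cons.mp h).1
            rw [ht] at hu
            simp [redStep, ht, Ne.symm hu]
      · simp [redStep, ht]

theorem foldl_pair {st : List Char} (h : List.IsChain Ne st) (a : Char) (xs : List Char) :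
    List.foldl redStep st (a :: a :: xs) = List.foldl redStep st xs := by
  simp [List.foldl, redStep_pair h a]

-- one A-pass does not change the stack normal form (for a reduced stack)
theorem foldl_passA (l : List Char) :
    ∀ st : List Char, List.IsChain Ne st →
      List.foldl redStep st (passA l).1 = List.foldl redStep st l := by
  fun_induction passA l with
  | case1 => intro st _; rfl
  | case2 c => intro st _; rfl
  | case3 a rest ih =>
      intro st hst
      simpa [foldl_pair hst] using ih st hst
  | case4 a b rest h ih =>
      intro st hst
      simpa using ih (redStep st a) (redStep_chain hst a)

-- if the pass removed nothing, the input has no adjacent equal pair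
theorem passA_chain (l : List Char) : (passA l).2 = false → List.IsChain Ne l := by
  fun_induction passA l with
  | case1 => intro _; exact List.IsChain.nil
  | case2 c => intro _; exact List.IsChain.singleton _
  | case3 a rest ih => intro h; simp at h
  | case4 a b rest h ih =>
      intro hc
      simp only [] at hc
      exact List.isChain_cons_cons.mpr ⟨h, ih hc⟩

-- on an adjacent-distinct string the stack never pops
theorem foldl_nopop (l : List Char) :
    ∀ st : List Char, List.IsChain Ne l →
      (∀ t ts, st = t :: ts → ∀ c cs, l = c :: cs → t ≠ c) →
      List.foldl redStep st l = l.reverse ++ st := by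
  induction l with
  | nil => intro st _ _; simp
  | cons c l' ih =>
      intro st hch hhd
      have hstep : redStep st c = c :: st := by
        match st with
        | [] => rfl
        | t :: ts =>
            have : t ≠ c := hhd t ts rfl c l' rfl
            simp [redStep, this]
      have hhd' : ∀ t ts, (c :: st) = t :: ts → ∀ d ds, l' = d :: ds → t ≠ d := by
        intro t ts hts d ds hds
        cases hts
        subst hds
        exact ((List.isChain_cons.mp hch).1 d (by simp))
      rw [List.foldl_cons, hstep, ih (c :: st) hch.tail hhd']
      simp

theorem sameGo_eq (l : List Char) :
    sameGo l = ((List.foldl redStep [] l).length : Int) := by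
  fun_induction sameGo l with
  | case1 l h ih =>
      rw [ih, foldl_passA l [] (by exact List.IsChain.nil)]
  | case2 l h =>
      have hch := passA_chain l (by simpa using h)
      rw [foldl_nopop l [] hch (by intro t ts hts; simp at hts)]
      simp

-- ===== VERDICT (by name: the statement is the Claim_ definition above) =====
theorem same_char_spec : Claim_equal_same_char := by
  intro chars _
  unfold Spec_same_char same_char same_char_alt
  exact sameGo_eq chars.toList
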